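-- pv_equiv track=rewrite | github.com/code-alchemist01/LeetCode-Algorithm-Solutions | Problems/001-100/6-Zigzag Conversion.py | convert
-- ===== SOURCE A (Python) =====
-- def convert(s, numRows):
--     # Edge case: tek satır veya string kısa ise direkt döndür
--     if numRows == 1 or numRows >= len(s):
--         return s
--
--     result = []
--     n = len(s)
--     cycle_len = 2 * numRows - 2  # Bir zigzag döngüsünün uzunluğu
--
--     # Her satırı ayrı ayrı işle
--     for i in range(numRows):
--         j = i  # İlk karakter indeksi
--
--         while j < n:
--             result.append(s[j])  # Ana karakter
--
--             # Orta satırlar için ara karakteri de ekle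
--             if i != 0 and i != numRows - 1:
--                 next_j = j + cycle_len - 2 * i
--                 if next_j < n:
--                     result.append(s[next_j])
--
--             j += cycle_len  # Bir sonraki döngüye geç
--
--     return ''.join(result)
-- ===== SOURCE B (Python) =====
-- def convert(s, numRows):
--     # Same edge guards as the problem requires.
--     if numRows == 1 or numRows >= len(s):
--         return s
--     # One forward pass: distribute characters into row buffers, bouncing
--     # the cursor between the top and bottom rows.
--     rows = [[] for _ in range(numRows)]
--     cur, step = 0, 1
--     for c in s:
--         rows[cur].append(c)
--         if cur == 0:
--             step = 1
--         elif cur == numRows - 1: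
--             step = -1
--         cur += step
--     return ''.join(''.join(r) for r in rows)
-- ===== Notes on version B (the rewrite author's own statement) =====
-- stated objective: idiomatic
-- what changed: Replaces A's per-row arithmetic walk over zigzag cycle indices (outer loop over rows, inner while jumping by cycle_len with a mid-row extra index) by the idiomatic single forward pass that distributes each character into one of numRows row buffers with a cursor that bounces between the top and bottom rows, then joins the buffers.
-- outside the precondition, e.g. on convert('ab', 0): A returns '', B raises IndexError
import Mathlib
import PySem

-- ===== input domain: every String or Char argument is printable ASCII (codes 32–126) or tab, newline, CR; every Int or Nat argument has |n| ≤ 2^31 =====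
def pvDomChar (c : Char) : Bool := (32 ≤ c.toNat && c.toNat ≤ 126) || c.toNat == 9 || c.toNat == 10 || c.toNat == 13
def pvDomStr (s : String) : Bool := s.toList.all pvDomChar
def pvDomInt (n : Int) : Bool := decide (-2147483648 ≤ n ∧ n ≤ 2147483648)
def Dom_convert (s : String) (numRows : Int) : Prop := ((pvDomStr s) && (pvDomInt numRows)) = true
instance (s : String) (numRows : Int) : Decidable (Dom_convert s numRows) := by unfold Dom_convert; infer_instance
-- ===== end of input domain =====

-- B replaces A's per-row zigzag index arithmetic by one forward pass distributing
-- characters into row buffers with a bouncing cursor (idiomatic; same O(n) cost).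

-- ===== PORT A =====
-- inner `while j < n` loop of A. The `0 < 2*R-2` conjunct is a termination guard
-- only: whenever Python reaches this loop, numRows ≥ 2 (the guards returned
-- earlier otherwise), so the port is exact. `pyGetD … ' '` ports `s[j]`; every
-- reachable index is in range.
def convertLoopA (l : List Char) (n R i j : Int) (acc : List Char) : List Char :=
  if h : j < n ∧ 0 < 2 * R - 2 then
    let acc1 := acc ++ [PySem.List.pyGetD l j ' ']
    let acc2 :=
      if i ≠ 0 ∧ i ≠ R - 1 then
        (if j + (2 * R - 2) - 2 * i < n then acc1 ++ [PySem.List.pyGetD l (j + (2 * R - 2) - 2 * i) ' '] else acc1)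
      else acc1
    convertLoopA l n R i (j + (2 * R - 2)) acc2
  else acc
termination_by (n - j).toNat
decreasing_by omega

def convert (s : String) (numRows : Int) : String :=
  if numRows = 1 ∨ PySem.Str.len s ≤ numRows then s
  else
    String.ofList ((PySem.List.pyRange 0 numRows 1).foldl
      (fun acc i => convertLoopA s.toList (PySem.Str.len s) numRows i i acc) [])

-- ===== PORT B =====
-- one step of B's `for c in s` loop; `rows[cur].append(c)` is List.modify at
-- cur.toNat (cur stays in [0, numRows) on every admitted input, so exact).
def convertStepB (numRows : Int) (st : List (List Char) × Int × Int) (c : Char) :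
    List (List Char) × Int × Int :=
  let step' := if st.2.1 = 0 then 1 else if st.2.1 = numRows - 1 then -1 else st.2.2
  (st.1.modify st.2.1.toNat (· ++ [c]), st.2.1 + step', step')

def convert_alt (s : String) (numRows : Int) : String :=
  if numRows = 1 ∨ PySem.Str.len s ≤ numRows then s
  else
    let rows0 : List (List Char) := (PySem.List.pyRange 0 numRows 1).map (fun _ => [])
    let r := s.toList.foldl (convertStepB numRows) (rows0, 0, 1)
    String.ofList r.1.flatten

-- ===== PRECONDITION & SPEC =====
-- Pre_ excludes nonempty s with numRows ≤ 0, where A's loops are empty and it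
-- accidentally returns '' while B's row-buffer indexing raises IndexError.
def Pre_convert (s : String) (numRows : Int) : Prop := 1 ≤ numRows ∨ s = ""
instance (s : String) (numRows : Int) : Decidable (Pre_convert s numRows) := by
  unfold Pre_convert; infer_instance
def pvWitness_convert : String × Int := ("PAYPALISHIRING", 3)

def Spec_convert (s : String) (numRows : Int) (out : String) : Prop := out = convert_alt s numRows
instance (s : String) (numRows : Int) (out : String) : Decidable (Spec_convert s numRows out) := by unfold Spec_convert; infer_instance

-- ===== CLAIM (what is proved, stated in full; the proofs are below) =====
def Claim_equal_convert : Prop := ∀ (s : String) (numRows : Int), Dom_convert s numRows → Pre_convert s numRows → Spec_convert s numRows (convert s numRows)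

-- ===== LEMMAS AND PROOFS =====

-- row index of character k in the zigzag with R rows (R ≥ 2)
def rowOf (R k : Nat) : Nat :=
  if k % (2 * R - 2) < R then k % (2 * R - 2) else (2 * R - 2) - k % (2 * R - 2)

-- direction of B's cursor after k characters
def stepAt (R k : Nat) : Int :=
  if k = 0 then 1
  else if k % (2 * R - 2) = 0 then -1
  else if k % (2 * R - 2) ≤ R - 1 then 1 else -1

-- B's row buffers after the first k characters
def rowsAt (l : List Char) (R k : Nat) : List (List Char) :=
  (List.range R).map (fun i =>
    ((List.range k).filter (fun j => rowOf R j = i)).map (fun j => l.getD j ' '))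

theorem rowOf_eq_iff (R i j k : Nat) (hR : 2 ≤ R) (hi : i < R)
    (hj : j % (2 * R - 2) = i) (h1 : j ≤ k) (h2 : k < j + (2 * R - 2)) :
    rowOf R k = i ↔ (k = j ∨ (i ≠ 0 ∧ i ≠ R - 1 ∧ k = j + ((2 * R - 2) - 2 * i))) := by
  have hdlt : k - j < 2 * R - 2 := by omega
  have hd : k % (2 * R - 2) = (i + (k - j)) % (2 * R - 2) := by
    conv_lhs => rw [show k = j + (k - j) by omega]
    rw [Nat.add_mod, hj, Nat.mod_eq_of_lt hdlt]
  by_cases hcase : i + (k - j) < 2 * R - 2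
  · rw [Nat.mod_eq_of_lt hcase] at hd
    unfold rowOf; rw [hd]; split <;> omega
  · have h2cyc : i + (k - j) - (2 * R - 2) < 2 * R - 2 := by omega
    have hd2 : (i + (k - j)) % (2 * R - 2) = i + (k - j) - (2 * R - 2) := by
      rw [Nat.mod_eq_sub_mod (by omega), Nat.mod_eq_of_lt h2cyc]
    rw [hd2] at hd
    unfold rowOf; rw [hd]; split <;> omega

-- pure arithmetic core of the cursor/direction update (m = k % cyc, m' = (k+1) % cyc)
theorem step_core (R k m m' : Nat) (hR : 2 ≤ R) (hm : m < 2 * R - 2) (hk0 : k = 0 → m = 0)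
    (hsucc : (m + 1 = 2 * R - 2 ∧ m' = 0) ∨ (m + 1 ≠ 2 * R - 2 ∧ m' = m + 1)) :
    (if ((if m < R then m else 2 * R - 2 - m : Nat) : Int) = 0 then 1
     else if ((if m < R then m else 2 * R - 2 - m : Nat) : Int) = (R : Int) - 1 then -1
     else (if k = 0 then 1 else if m = 0 then -1 else if m ≤ R - 1 then (1 : Int) else -1))
      = (if k + 1 = 0 then 1 else if m' = 0 then -1 else if m' ≤ R - 1 then 1 else -1)
    ∧ ((if m < R then m else 2 * R - 2 - m : Nat) : Int)
        + (if k + 1 = 0 then 1 else if m' = 0 then -1 else if m' ≤ R - 1 then (1 : Int) else -1)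
      = ((if m' < R then m' else 2 * R - 2 - m' : Nat) : Int) := by
  have hQ : ∀ n : Nat, n = 0 ∨ 0 < n := fun n => Nat.eq_zero_or_pos n
  rcases hsucc with ⟨h1, h2⟩ | ⟨h1, h2⟩ <;> subst h2 <;>
    rcases hQ k with hk | hk <;>
    (try have hm0 := hk0 hk) <;>
    constructor <;> split_ifs <;> first | omega | exact ‹False›.elim

theorem step_next (R k : Nat) (hR : 2 ≤ R) :
    (if (rowOf R k : Int) = 0 then 1
     else if (rowOf R k : Int) = (R : Int) - 1 then -1 else stepAt R k) = stepAt R (k + 1)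
    ∧ (rowOf R k : Int) + stepAt R (k + 1) = (rowOf R (k + 1) : Int) := by
  have hm := Nat.mod_lt k (show 0 < 2 * R - 2 by omega)
  have hk0 : k = 0 → k % (2 * R - 2) = 0 := fun h => by simp [h]
  have hsucc : (k % (2 * R - 2) + 1 = 2 * R - 2 ∧ (k + 1) % (2 * R - 2) = 0)
      ∨ (k % (2 * R - 2) + 1 ≠ 2 * R - 2 ∧ (k + 1) % (2 * R - 2) = k % (2 * R - 2) + 1) := by
    have h1 : (k + 1) % (2 * R - 2) = (k % (2 * R - 2) + 1) % (2 * R - 2) := by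
      rw [Nat.add_mod, Nat.mod_eq_of_lt (show 1 < 2 * R - 2 by omega)]
    by_cases hEnd : k % (2 * R - 2) + 1 = 2 * R - 2
    · exact Or.inl ⟨hEnd, by rw [h1, hEnd, Nat.mod_self]⟩
    · exact Or.inr ⟨hEnd, by
        rw [h1, Nat.mod_eq_of_lt (show k % (2 * R - 2) + 1 < 2 * R - 2 by omega)]⟩
  unfold rowOf stepAt
  exact step_core R k (k % (2 * R - 2)) ((k + 1) % (2 * R - 2)) hR hm hk0 hsucc

theorem filter_range'_nil (P : Nat → Bool) (a L : Nat)
    (h : ∀ k, a ≤ k → k < a + L → P k = false) :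
    (List.range' a L).filter P = [] := by
  rw [List.filter_eq_nil_iff]
  intro k hk
  rw [List.mem_range'_1] at hk
  simp [h k hk.1 hk.2]

theorem filter_range'_single (P : Nat → Bool) (a L x : Nat) (hx1 : a ≤ x) (hx2 : x < a + L)
    (h : ∀ k, a ≤ k → k < a + L → (P k = true ↔ k = x)) :
    (List.range' a L).filter P = [x] := by
  cases L with
  | zero => omega
  | succ L =>
    rw [List.range'_succ, List.filter_cons]
    by_cases hax : a = x
    · subst hax
      have hPa : P a = true := (h a le_rfl (by omega)).mpr rfl
      have htail : (List.range' (a + 1) L).filter P = [] :=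
        filter_range'_nil P (a + 1) L (fun k hk1 hk2 => by
          by_contra hP
          rw [Bool.not_eq_false] at hP
          have := (h k (by omega) (by omega)).mp hP
          omega)
      simp [hPa, htail]
    · have hPa : P a = false := by
        by_contra hP
        rw [Bool.not_eq_false] at hP
        exact hax ((h a le_rfl (by omega)).mp hP)
      rw [hPa]
      simp only [Bool.false_eq_true, if_false]
      exact filter_range'_single P (a + 1) L x (by omega) (by omega)
        (fun k hk1 hk2 => h k (by omega) (by omega))
termination_by L

theorem filter_range'_pair (P : Nat → Bool) (a L x y : Nat) (hx1 : a ≤ x) (hxy : x < y)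
    (hy : y < a + L) (h : ∀ k, a ≤ k → k < a + L → (P k = true ↔ (k = x ∨ k = y))) :
    (List.range' a L).filter P = [x, y] := by
  have hsplit : List.range' a L = List.range' a (y - a) ++ List.range' y (L - (y - a)) := by
    have h2 := @List.range'_append a (y - a) (L - (y - a)) 1
    rw [show a + 1 * (y - a) = y by omega, show (y - a) + (L - (y - a)) = L by omega] at h2
    exact h2.symm
  rw [hsplit, List.filter_append,
    filter_range'_single P a (y - a) x hx1 (by omega) (fun k hk1 hk2 => by
      have hk := h k (by omega) (by omega)
      exact ⟨fun hp => (hk.mp hp).resolve_right (by omega),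
        fun hkx => hk.mpr (Or.inl hkx)⟩),
    filter_range'_single P y (L - (y - a)) y le_rfl (by omega) (fun k hk1 hk2 => by
      have hk := h k (by omega) (by omega)
      exact ⟨fun hp => (hk.mp hp).resolve_left (by omega),
        fun hky => hk.mpr (Or.inr hky)⟩)]
  rfl

theorem onePeriod (R i j L : Nat) (hR : 2 ≤ R) (hi : i < R) (hj : j % (2 * R - 2) = i)
    (hL1 : 0 < L) (hL2 : L ≤ 2 * R - 2) :
    (List.range' j L).filter (fun k => rowOf R k = i) =
      if i ≠ 0 ∧ i ≠ R - 1 ∧ j + ((2 * R - 2) - 2 * i) < j + L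
      then [j, j + ((2 * R - 2) - 2 * i)] else [j] := by
  by_cases hc : i ≠ 0 ∧ i ≠ R - 1 ∧ j + ((2 * R - 2) - 2 * i) < j + L
  · rw [if_pos hc]
    apply filter_range'_pair _ _ _ _ _ le_rfl (show j < j + ((2 * R - 2) - 2 * i) by
      have := hc.1; have := hc.2.1; omega) hc.2.2
    intro k hk1 hk2
    have hk := rowOf_eq_iff R i j k hR hi hj hk1 (by omega)
    simp only [decide_eq_true_eq]
    rw [hk]
    constructor
    · rintro (rfl | ⟨_, _, rfl⟩)
      · exact Or.inl rfl
      · exact Or.inr rfl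
    · rintro (rfl | rfl)
      · exact Or.inl rfl
      · exact Or.inr ⟨hc.1, hc.2.1, rfl⟩
  · rw [if_neg hc]
    apply filter_range'_single _ _ _ _ le_rfl (by omega)
    intro k hk1 hk2
    have hk := rowOf_eq_iff R i j k hR hi hj hk1 (by omega)
    simp only [decide_eq_true_eq]
    rw [hk]
    constructor
    · rintro (rfl | ⟨h1, h2, rfl⟩)
      · rfl
      · exact absurd ⟨h1, h2, by omega⟩ hc
    · rintro rfl
      exact Or.inl rfl

theorem convertLoopA_append (l : List Char) (n R i j : Int) (acc : List Char) :
    convertLoopA l n R i j acc = acc ++ convertLoopA l n R i j [] := by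
  by_cases h : j < n ∧ 0 < 2 * R - 2
  · conv_lhs => rw [convertLoopA]
    conv_rhs => rw [convertLoopA]
    simp only [dif_pos h]
    rw [convertLoopA_append l n R i (j + (2 * R - 2))
        (if i ≠ 0 ∧ i ≠ R - 1 then
          (if j + (2 * R - 2) - 2 * i < n then
            (acc ++ [PySem.List.pyGetD l j ' ']) ++ [PySem.List.pyGetD l (j + (2 * R - 2) - 2 * i) ' ']
          else acc ++ [PySem.List.pyGetD l j ' '])
        else acc ++ [PySem.List.pyGetD l j ' ']),
      convertLoopA_append l n R i (j + (2 * R - 2))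
        (if i ≠ 0 ∧ i ≠ R - 1 then
          (if j + (2 * R - 2) - 2 * i < n then
            ([] ++ [PySem.List.pyGetD l j ' ']) ++ [PySem.List.pyGetD l (j + (2 * R - 2) - 2 * i) ' ']
          else [] ++ [PySem.List.pyGetD l j ' '])
        else [] ++ [PySem.List.pyGetD l j ' '])]
    split_ifs <;> simp
  · conv_lhs => rw [convertLoopA]
    conv_rhs => rw [convertLoopA]
    simp only [dif_neg h]
    simp
termination_by (n - j).toNat
decreasing_by all_goals omega

-- A's inner loop from j produces exactly the row-i characters at indices ≥ j
theorem loopA_eq (l : List Char) (R i : Nat) (hR : 2 ≤ R) (hi : i < R) (j : Nat)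
    (hj : j % (2 * R - 2) = i) :
    convertLoopA l (l.length : Int) (R : Int) (i : Int) (j : Int) [] =
      ((List.range' j (l.length - j)).filter (fun k => rowOf R k = i)).map
        (fun k => l.getD k ' ') := by
  by_cases hjn : j < l.length
  case neg =>
    rw [convertLoopA, dif_neg (by intro hcc; have := hcc.1; omega)]
    rw [show l.length - j = 0 by omega]
    simp
  case pos =>
    -- cast bookkeeping
    have hcast1 : ((j : Int) + (2 * (R : Int) - 2)) = ((j + (2 * R - 2) : Nat) : Int) := by omega
    have hcast2 : ((j : Int) + (2 * (R : Int) - 2) - 2 * (i : Int))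
        = ((j + ((2 * R - 2) - 2 * i) : Nat) : Int) := by omega
    have hrec : convertLoopA l (l.length : Int) (R : Int) (i : Int)
        ((j + (2 * R - 2) : Nat) : Int) [] =
        ((List.range' (j + (2 * R - 2)) (l.length - (j + (2 * R - 2)))).filter
          (fun k => rowOf R k = i)).map (fun k => l.getD k ' ') :=
      loopA_eq l R i hR hi (j + (2 * R - 2)) (by rw [Nat.add_mod_right]; exact hj)
    conv_lhs => rw [convertLoopA]
    rw [dif_pos (by constructor <;> omega)]
    simp only [PySem.List.pyGetD_natCast, List.nil_append, hcast2,
      PySem.List.pyGetD_natCast]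
    rw [convertLoopA_append, hcast1, hrec]
    by_cases hmid : i ≠ 0 ∧ i ≠ R - 1
    · rw [if_pos (show (i : Int) ≠ 0 ∧ (i : Int) ≠ (R : Int) - 1 from ⟨by omega, by omega⟩)]
      by_cases hbig : j + (2 * R - 2) ≤ l.length
      · have hsplit : List.range' j (l.length - j) =
            List.range' j (2 * R - 2) ++
              List.range' (j + (2 * R - 2)) (l.length - (j + (2 * R - 2))) := by
          have h2 := @List.range'_append j (2 * R - 2) (l.length - (j + (2 * R - 2))) 1
          rw [show j + 1 * (2 * R - 2) = j + (2 * R - 2) by omega,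
            show (2 * R - 2) + (l.length - (j + (2 * R - 2))) = l.length - j by omega] at h2
          exact h2.symm
        rw [if_pos (show ((j + ((2 * R - 2) - 2 * i) : Nat) : Int) < (l.length : Int) from by
          have := hmid.1; omega)]
        rw [hsplit, List.filter_append, List.map_append,
          onePeriod R i j (2 * R - 2) hR hi hj (by omega) le_rfl,
          if_pos (show i ≠ 0 ∧ i ≠ R - 1 ∧ j + ((2 * R - 2) - 2 * i) < j + (2 * R - 2) from
            ⟨hmid.1, hmid.2, by have := hmid.1; omega⟩)]
        simp
      · have hrecnil : ((List.range' (j + (2 * R - 2)) (l.length - (j + (2 * R - 2)))).filter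
            (fun k => decide (rowOf R k = i))).map (fun k => l.getD k ' ') = [] := by
          rw [show l.length - (j + (2 * R - 2)) = 0 by omega]
          rfl
        rw [onePeriod R i j (l.length - j) hR hi hj (by omega) (by omega)]
        by_cases hnj : j + ((2 * R - 2) - 2 * i) < l.length
        · rw [if_pos (show ((j + ((2 * R - 2) - 2 * i) : Nat) : Int) < (l.length : Int) from
              by omega),
            if_pos (show i ≠ 0 ∧ i ≠ R - 1 ∧ j + ((2 * R - 2) - 2 * i) < j + (l.length - j) from
              ⟨hmid.1, hmid.2, by omega⟩), hrecnil]
          simp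
        · rw [if_neg (show ¬ ((j + ((2 * R - 2) - 2 * i) : Nat) : Int) < (l.length : Int) from
              by omega),
            if_neg (show ¬ (i ≠ 0 ∧ i ≠ R - 1 ∧ j + ((2 * R - 2) - 2 * i) < j + (l.length - j))
              from by intro hcc; exact absurd hcc.2.2 (by omega)), hrecnil]
          simp
    · rw [if_neg (show ¬ ((i : Int) ≠ 0 ∧ (i : Int) ≠ (R : Int) - 1) from by
        intro hcc
        exact hmid ⟨by have := hcc.1; omega, by have := hcc.2; omega⟩)]
      by_cases hbig : j + (2 * R - 2) ≤ l.length
      · have hsplit : List.range' j (l.length - j) =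
            List.range' j (2 * R - 2) ++
              List.range' (j + (2 * R - 2)) (l.length - (j + (2 * R - 2))) := by
          have h2 := @List.range'_append j (2 * R - 2) (l.length - (j + (2 * R - 2))) 1
          rw [show j + 1 * (2 * R - 2) = j + (2 * R - 2) by omega,
            show (2 * R - 2) + (l.length - (j + (2 * R - 2))) = l.length - j by omega] at h2
          exact h2.symm
        rw [hsplit, List.filter_append, List.map_append,
          onePeriod R i j (2 * R - 2) hR hi hj (by omega) le_rfl,
          if_neg (show ¬ (i ≠ 0 ∧ i ≠ R - 1 ∧ j + ((2 * R - 2) - 2 * i) < j + (2 * R - 2)) from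
            by intro hcc; exact hmid ⟨hcc.1, hcc.2.1⟩)]
        simp
      · have hrecnil : ((List.range' (j + (2 * R - 2)) (l.length - (j + (2 * R - 2)))).filter
            (fun k => decide (rowOf R k = i))).map (fun k => l.getD k ' ') = [] := by
          rw [show l.length - (j + (2 * R - 2)) = 0 by omega]
          rfl
        rw [onePeriod R i j (l.length - j) hR hi hj (by omega) (by omega),
          if_neg (show ¬ (i ≠ 0 ∧ i ≠ R - 1 ∧ j + ((2 * R - 2) - 2 * i) < j + (l.length - j)) from
            by intro hcc; exact hmid ⟨hcc.1, hcc.2.1⟩), hrecnil]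
        simp
termination_by l.length - j
decreasing_by all_goals omega

theorem target_shift (l : List Char) (R i : Nat) (hR : 2 ≤ R) (hi : i < R)
    (hn : R < l.length) :
    (List.range l.length).filter (fun k => rowOf R k = i) =
      (List.range' i (l.length - i)).filter (fun k => rowOf R k = i) := by
  rw [List.range_eq_range']
  have hsplit : List.range' 0 l.length = List.range' 0 i ++ List.range' i (l.length - i) := by
    have h2 := @List.range'_append 0 i (l.length - i) 1
    rw [show 0 + 1 * i = i by omega, show i + (l.length - i) = l.length by omega] at h2
    exact h2.symm
  rw [hsplit, List.filter_append,
    filter_range'_nil _ 0 i (fun k hk1 hk2 => by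
      have hro : rowOf R k = k := by
        unfold rowOf
        rw [Nat.mod_eq_of_lt (show k < 2 * R - 2 by omega), if_pos (by omega)]
      simp only [hro, decide_eq_false_iff_not]
      omega),
    List.nil_append]

theorem A_full (l : List Char) (R : Nat) (hR : 2 ≤ R) (hn : R < l.length) :
    (PySem.List.pyRange 0 (R : Int) 1).foldl
      (fun acc i => convertLoopA l (l.length : Int) (R : Int) i i acc) [] =
    (rowsAt l R l.length).flatten := by
  rw [PySem.List.pyRange_one]
  simp only [Int.sub_zero, Int.toNat_natCast, List.foldl_map]
  rw [PySem.List.foldl_congr_mem (List.range R)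
    (fun x y => convertLoopA l (l.length : Int) (R : Int) (0 + (y : Int)) (0 + (y : Int)) x)
    (fun (acc : List Char) (i : Nat) =>
      acc ++ ((List.range l.length).filter (fun k => rowOf R k = i)).map (fun k => l.getD k ' '))
    []
    (by
      intro acc i hmem
      rw [List.mem_range] at hmem
      simp only [zero_add]
      rw [convertLoopA_append,
        loopA_eq l R i hR hmem i (Nat.mod_eq_of_lt (by omega)),
        target_shift l R i hR hmem (by omega)]),
    PySem.List.foldl_append_eq_flatMap]
  rw [List.nil_append]
  unfold rowsAt
  rw [← List.flatMap_def]

theorem rowsAt_succ (l : List Char) (R k : Nat) :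
    rowsAt l R (k + 1) = (rowsAt l R k).modify (rowOf R k) (· ++ [l.getD k ' ']) := by
  unfold rowsAt
  apply List.ext_getElem
  · simp
  · intro p hp hp2
    simp only [List.length_map, List.length_range] at hp
    rw [List.getElem_modify _ _ _ _ (by simpa using hp)]
    simp only [List.getElem_map, List.getElem_range]
    rw [List.range_succ, List.filter_append, List.map_append]
    by_cases hcase : rowOf R k = p
    · rw [if_pos hcase]
      simp [hcase]
    · rw [if_neg hcase]
      simp [hcase]

theorem B_inv (l : List Char) (R : Nat) (hR : 2 ≤ R) (k : Nat) (hk : k ≤ l.length) :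
    (l.take k).foldl (convertStepB (R : Int))
        ((List.range R).map (fun _ => ([] : List Char)), 0, 1) =
      (rowsAt l R k, (rowOf R k : Int), stepAt R k) := by
  induction k with
  | zero =>
    simp only [List.take_zero, List.foldl_nil]
    unfold rowsAt rowOf stepAt
    simp
    omega
  | succ k ih =>
    have hklt : k < l.length := by omega
    rw [List.take_add_one, List.foldl_append, ih (by omega),
      List.getElem?_eq_getElem hklt]
    simp only [Option.toList_some, List.foldl_cons, List.foldl_nil]
    unfold convertStepB
    obtain ⟨hstep, hrow⟩ := step_next R k hR
    simp only
    refine Prod.ext ?_ (Prod.ext ?_ ?_)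
    · simp only [Int.toNat_natCast]
      rw [rowsAt_succ l R k, List.getD_eq_getElem l ' ' hklt]
    · simp only [hstep]
      exact hrow
    · exact hstep

-- ===== VERDICT (by name: the statement is the Claim_ definition above) =====
theorem convert_spec : Claim_equal_convert := by
  intro s numRows hdom hpre
  unfold Spec_convert convert convert_alt
  by_cases hg : numRows = 1 ∨ PySem.Str.len s ≤ numRows
  · rw [if_pos hg, if_pos hg]
  · rw [if_neg hg, if_neg hg]
    push Not at hg
    obtain ⟨hg1, hg2⟩ := hg
    have hlen : PySem.Str.len s = (s.toList.length : Int) := by simp [pysem]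
    rw [hlen] at hg2
    dsimp only
    rcases hpre with hpos | hemp
    · have hNR : numRows = ((numRows.toNat : Nat) : Int) := by omega
      have hR : 2 ≤ numRows.toNat := by omega
      have hn : numRows.toNat < s.toList.length := by omega
      rw [hlen, hNR]
      refine congrArg String.ofList ?_
      rw [A_full s.toList numRows.toNat hR hn]
      rw [PySem.List.pyRange_one]
      simp only [Int.sub_zero, Int.toNat_natCast, List.map_map]
      have hB := B_inv s.toList numRows.toNat hR s.toList.length le_rfl
      rw [List.take_length] at hB
      rw [show (List.map ((fun _ => ([] : List Char)) ∘ fun (k : Nat) => (0 : Int) + (k : Int))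
          (List.range numRows.toNat)) = List.map (fun _ => ([] : List Char))
          (List.range numRows.toNat) from rfl,
        hB]
    · subst hemp
      have hnil : PySem.List.pyRange 0 numRows 1 = [] :=
        PySem.List.pyRange_one_eq_nil (by simp at hg2; omega)
      simp [hnil]
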